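-- pv_equiv track=rewrite | github.com/Andy963/note | Algorithm/14.py | solve
-- ===== SOURCE A (Python) =====
-- def solve(N):
--     n_str = str(N)
--     res = 0
--     multiplier = 1
--     for i in range(len(n_str)-1, -1,-1):
--         digit = int(n_str[i])
--         if digit > 4:
--             digit -= 1
--         res += digit * multiplier
--         multiplier *= 9
--     return res
-- ===== SOURCE B (Python) =====
-- def solve(N):
--     res = 0
--     for c in str(N):
--         digit = int(c)
--         if digit > 4:
--             digit -= 1
--         res = res * 9 + digit
--     return res
-- ===== Notes on version B (the rewrite author's own statement) =====
-- stated objective: simpler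
-- what changed: Replaces the reversed index loop with a separate positional-multiplier accumulator by a single forward left-to-right Horner pass (res = res*9 + digit), dropping the multiplier state and the index arithmetic.
import Mathlib
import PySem

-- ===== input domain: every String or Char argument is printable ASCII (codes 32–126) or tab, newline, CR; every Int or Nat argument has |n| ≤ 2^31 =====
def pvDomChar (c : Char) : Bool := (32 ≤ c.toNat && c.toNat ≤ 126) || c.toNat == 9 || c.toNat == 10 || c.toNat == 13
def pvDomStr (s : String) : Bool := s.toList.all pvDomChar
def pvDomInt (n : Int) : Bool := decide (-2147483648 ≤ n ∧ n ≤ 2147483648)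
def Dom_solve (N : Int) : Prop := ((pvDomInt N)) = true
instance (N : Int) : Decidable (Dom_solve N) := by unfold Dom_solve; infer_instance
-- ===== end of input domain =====

-- B is the same base-9 evaluation written as a single forward Horner pass (res = res*9 + digit),
-- dropping A's reversed index loop and separate positional-multiplier state. Return values only.

-- int(c) for a one-character string c (shared transliteration of `int(n_str[i])` / `int(c)`);
-- the default 0 is unreachable under Pre_solve (digits only).
def pvIntOfChar (c : Char) : Int := (PySem.Int.ofChars? [c]).getD 0

-- ===== PORT A =====
def solve (N : Int) : Int :=
  let nStr : List Char := PySem.Int.toChars N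
  let st := (PySem.List.pyRange ((nStr.length : Int) - 1) (-1) (-1)).foldl
    (fun (p : Int × Int) i =>
      let digit := pvIntOfChar (PySem.List.pyGetD nStr i ' ')
      let digit := if digit > 4 then digit - 1 else digit
      (p.1 + digit * p.2, p.2 * 9)) (0, 1)
  st.1

-- ===== PORT B =====
def solve_alt (N : Int) : Int :=
  (PySem.Int.toChars N).foldl
    (fun res c =>
      let digit := pvIntOfChar c
      let digit := if digit > 4 then digit - 1 else digit
      res * 9 + digit) 0

-- ===== PRECONDITION & SPEC =====
-- Pre_ excludes negative N, on which both Pythons raise ValueError (int('-') on the sign character).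
def Pre_solve (N : Int) : Prop := 0 ≤ N
instance (N : Int) : Decidable (Pre_solve N) := by unfold Pre_solve; infer_instance
def pvWitness_solve : Int := 57

def Spec_solve (N : Int) (out : Int) : Prop := out = solve_alt N
instance (N : Int) (out : Int) : Decidable (Spec_solve N out) := by unfold Spec_solve; infer_instance

-- ===== CLAIM (what is proved, stated in full; the proofs are below) =====
def Claim_equal_solve : Prop := ∀ (N : Int), Dom_solve N → Pre_solve N → Spec_solve N (solve N)

-- ===== LEMMAS AND PROOFS =====

-- remapped digit value of a character
def pvF (c : Char) : Int :=
  let d := pvIntOfChar c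
  if d > 4 then d - 1 else d

-- little-endian Horner value of a digit-character list
def pvH : List Char → Int
  | [] => 0
  | c :: t => pvF c + 9 * pvH t

theorem pvFold_idx (l : List Char) (idxs : List Int) (init : Int × Int) :
    idxs.foldl (fun (p : Int × Int) i =>
        (p.1 + (let d := pvIntOfChar (PySem.List.pyGetD l i ' '); if d > 4 then d - 1 else d) * p.2,
         p.2 * 9)) init
      = (idxs.map (fun i => PySem.List.pyGetD l i ' ')).foldl
        (fun (p : Int × Int) c =>
          (p.1 + (let d := pvIntOfChar c; if d > 4 then d - 1 else d) * p.2, p.2 * 9)) init := by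
  induction idxs generalizing init with
  | nil => rfl
  | cons i t ih => simp only [List.foldl_cons, List.map_cons, ih]

theorem pvA_fold (r : List Char) (res m : Int) :
    (r.foldl (fun (p : Int × Int) c =>
        (p.1 + (let d := pvIntOfChar c; if d > 4 then d - 1 else d) * p.2, p.2 * 9)) (res, m)).1
      = res + m * pvH r := by
  induction r generalizing res m with
  | nil => simp [pvH]
  | cons c t ih => simp only [List.foldl_cons, ih, pvH, pvF]; ring

theorem pvH_append (xs : List Char) (c : Char) :
    pvH (xs ++ [c]) = pvH xs + pvF c * 9 ^ xs.length := by
  induction xs with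
  | nil => simp [pvH]
  | cons x t ih => simp [pvH, ih, pow_succ]; ring

theorem pvB_fold (l : List Char) (acc : Int) :
    l.foldl (fun res c =>
        res * 9 + (let d := pvIntOfChar c; if d > 4 then d - 1 else d)) acc
      = acc * 9 ^ l.length + pvH l.reverse := by
  induction l generalizing acc with
  | nil => simp [pvH]
  | cons c t ih =>
    simp only [List.foldl_cons, ih, List.reverse_cons, pvH_append, List.length_reverse,
      List.length_cons, pvF]
    ring

-- ===== VERDICT (by name: the statement is the Claim_ definition above) =====
theorem solve_spec : Claim_equal_solve := by
  intro N _ _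
  show solve N = solve_alt N
  have key : ∀ (l : List Char),
      ((PySem.List.pyRange ((l.length : Int) - 1) (-1) (-1)).foldl
        (fun (p : Int × Int) i =>
          (p.1 + (let d := pvIntOfChar (PySem.List.pyGetD l i ' '); if d > 4 then d - 1 else d) * p.2,
           p.2 * 9)) (0, 1)).1
      = l.foldl (fun res c =>
          res * 9 + (let d := pvIntOfChar c; if d > 4 then d - 1 else d)) 0 := by
    intro l
    rw [show ((l.length : Int) - 1) = (-1) + 1 + (l.length : Int) - 1 by ring]
    rw [show PySem.List.pyRange ((-1) + 1 + (l.length : Int) - 1) (-1) (-1)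
        = (PySem.List.pyRange ((-1) + 1) ((-1) + 1 + (l.length : Int) - 1 + 1) 1).reverse
      from PySem.List.pyRange_neg_one_eq_reverse _ _]
    rw [show ((-1 : Int) + 1) = 0 by ring]
    rw [show ((0:Int) + (l.length : Int) - 1 + 1) = (l.length : Int) by ring]
    rw [pvFold_idx]
    rw [List.map_reverse, PySem.List.map_pyGetD_pyRange_zero' l ' ']
    rw [pvA_fold, pvB_fold]
    ring
  exact key (PySem.Int.toChars N)
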